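-- pv_equiv track=rewrite | github.com/Daniel730/bot-trading | scripts/seed_equal_wallet.py | format_t212_ticker
-- ===== SOURCE A (Python) =====
-- def format_t212_ticker(ticker: str) -> str:
--     if "_" in ticker:
--         return ticker
--     suffixes = {
--         ".DE": "_DE_EQ",
--         ".PA": "_PA_EQ",
--         ".L": "_L_EQ",
--         ".AS": "_AS_EQ",
--         ".SW": "_SW_EQ",
--         ".MI": "_MI_EQ",
--     }
--     for suffix, replacement in suffixes.items():
--         if ticker.endswith(suffix):
--             return ticker.removesuffix(suffix) + replacement
--     return f"{ticker}_US_EQ"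
-- ===== SOURCE B (Python) =====
-- def format_t212_ticker(ticker: str) -> str:
--     if "_" in ticker:
--         return ticker
--     three = {
--         ".DE": "_DE_EQ",
--         ".PA": "_PA_EQ",
--         ".AS": "_AS_EQ",
--         ".SW": "_SW_EQ",
--         ".MI": "_MI_EQ",
--     }
--     repl = three.get(ticker[-3:])
--     if repl is not None:
--         return ticker[:-3] + repl
--     if ticker[-2:] == ".L":
--         return ticker[:-2] + "_L_EQ"
--     return ticker + "_US_EQ"
-- ===== Notes on version B (the rewrite author's own statement) =====
-- stated objective: alternative
-- what changed: A scans the whole suffix table calling endswith on each entry; B extracts the candidate 3-character (then 2-character) tail of the ticker once and does a single dict lookup against the table, with no per-entry scan.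
import Mathlib
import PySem

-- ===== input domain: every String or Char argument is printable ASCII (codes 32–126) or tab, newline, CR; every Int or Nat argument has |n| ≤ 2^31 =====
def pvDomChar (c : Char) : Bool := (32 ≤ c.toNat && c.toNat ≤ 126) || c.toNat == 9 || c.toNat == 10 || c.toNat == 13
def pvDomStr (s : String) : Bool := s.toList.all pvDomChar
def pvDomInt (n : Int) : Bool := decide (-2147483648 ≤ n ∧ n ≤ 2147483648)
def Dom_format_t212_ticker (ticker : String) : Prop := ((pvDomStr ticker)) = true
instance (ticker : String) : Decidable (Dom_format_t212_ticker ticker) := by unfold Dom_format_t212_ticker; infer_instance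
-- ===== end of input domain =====

-- B replaces A's linear scan of the suffix table (endswith per entry) by direct
-- extraction of the candidate 2/3-char tail and a dict lookup (objective: alternative).


-- ===== PORT A =====
-- the dict literal 'suffixes' (items in insertion order)
def pvSuffixes : PySem.Dict (List Char) (List Char) := PySem.Dict.ofList
  [ (".DE".toList, "_DE_EQ".toList), (".PA".toList, "_PA_EQ".toList),
    (".L".toList, "_L_EQ".toList), (".AS".toList, "_AS_EQ".toList),
    (".SW".toList, "_SW_EQ".toList), (".MI".toList, "_MI_EQ".toList) ]

-- the 'for suffix, replacement in suffixes.items()' loop; 'ticker.removesuffix(suffix)'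
-- is ported as take (len - len suffix), exact here because it runs under the endswith guard
def pvScanA : List (List Char × List Char) → List Char → List Char
  | [], cs => cs ++ "_US_EQ".toList
  | (suf, rep) :: rest, cs =>
      if PySem.Chars.endswith cs suf then cs.take (cs.length - suf.length) ++ rep
      else pvScanA rest cs

def format_t212_ticker (ticker : String) : String :=
  if PySem.Str.isIn "_" ticker then ticker
  else String.ofList (pvScanA pvSuffixes.items ticker.toList)

-- ===== PORT B =====
-- B's dict literal 'three' (the 3-character keys)
def pvThree : PySem.Dict (List Char) (List Char) := PySem.Dict.ofList
  [ (".DE".toList, "_DE_EQ".toList), (".PA".toList, "_PA_EQ".toList),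
    (".AS".toList, "_AS_EQ".toList), (".SW".toList, "_SW_EQ".toList),
    (".MI".toList, "_MI_EQ".toList) ]

def format_t212_ticker_alt (ticker : String) : String :=
  if PySem.Str.isIn "_" ticker then ticker
  else
    let cs := ticker.toList
    match PySem.Dict.get? pvThree (PySem.List.slice cs (some (-3)) none) with
    | some rep => String.ofList (PySem.List.slice cs none (some (-3)) ++ rep)
    | none =>
      if PySem.List.slice cs (some (-2)) none = ".L".toList then
        String.ofList (PySem.List.slice cs none (some (-2)) ++ "_L_EQ".toList)
      else String.ofList (cs ++ "_US_EQ".toList)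

-- ===== PRECONDITION & SPEC =====
def Spec_format_t212_ticker (ticker : String) (out : String) : Prop := out = format_t212_ticker_alt ticker
instance (ticker : String) (out : String) : Decidable (Spec_format_t212_ticker ticker out) := by unfold Spec_format_t212_ticker; infer_instance

-- ===== CLAIM (what is proved, stated in full; the proofs are below) =====
def Claim_equal_format_t212_ticker : Prop := ∀ (ticker : String), Dom_format_t212_ticker ticker → Spec_format_t212_ticker ticker (format_t212_ticker ticker)

-- ===== LEMMAS AND PROOFS =====

-- s.endswith(p) is exactly 'the last len(p) characters equal p'
theorem pv_endswith_iff_drop (cs p : List Char) :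
    PySem.Chars.endswith cs p = true ↔ cs.drop (cs.length - p.length) = p := by
  rw [PySem.Chars.endswith_iff]
  constructor
  · rintro ⟨t, rfl⟩
    simp
  · intro h
    rw [← h]
    exact List.drop_suffix _ _

theorem pv_last_of_drop (cs l : List Char) (k : Nat) (h : cs.drop k = l) (hl : l ≠ []) :
    cs.getLast? = l.getLast? := by
  have hs : l <:+ cs := h ▸ List.drop_suffix _ _
  obtain ⟨t, rfl⟩ := hs
  exact List.getLast?_append_of_ne_nil t hl

theorem format_t212_ticker_main (cs : List Char) :
    format_t212_ticker (String.ofList cs) = format_t212_ticker_alt (String.ofList cs) := by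
  unfold format_t212_ticker format_t212_ticker_alt
  simp only [PySem.Str.isIn_eq, String.toList_ofList]
  by_cases hu : PySem.Chars.isIn "_".toList cs = true
  · rw [if_pos hu, if_pos hu]
  · rw [if_neg hu, if_neg hu]
    rw [PySem.List.slice_from_neg_ofNat cs 3 (by omega),
        PySem.List.slice_from_neg_ofNat cs 2 (by omega),
        PySem.List.slice_to_neg_ofNat cs 3 (by omega),
        PySem.List.slice_to_neg_ofNat cs 2 (by omega)]
    have hitems : pvSuffixes.items =
        [ (".DE".toList, "_DE_EQ".toList), (".PA".toList, "_PA_EQ".toList),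
          (".L".toList, "_L_EQ".toList), (".AS".toList, "_AS_EQ".toList),
          (".SW".toList, "_SW_EQ".toList), (".MI".toList, "_MI_EQ".toList) ] := by decide
    have h3 : pvThree = PySem.Dict.mk
        [ (".DE".toList, "_DE_EQ".toList), (".PA".toList, "_PA_EQ".toList),
          (".AS".toList, "_AS_EQ".toList), (".SW".toList, "_SW_EQ".toList),
          (".MI".toList, "_MI_EQ".toList) ] := by decide
    rw [hitems, h3]
    simp only [pvScanA, PySem.Dict.get?_mk_cons]
    -- turn every endswith test into a test on the dropped tail, then case on the six tails
    by_cases hDE : cs.drop (cs.length - 3) = ['.', 'D', 'E']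
    · simp [pv_endswith_iff_drop, hDE]
    · by_cases hPA : cs.drop (cs.length - 3) = ['.', 'P', 'A']
      · simp [pv_endswith_iff_drop, hPA]
      · by_cases hL : cs.drop (cs.length - 2) = ['.', 'L']
        · -- the last char is 'L', so none of the 3-char keys (ending E,A,S,W,I) can match
          have hlast : cs.getLast? = some 'L' := by
            rw [pv_last_of_drop cs ['.', 'L'] (cs.length - 2) hL (by decide)]; decide
          have hAS : cs.drop (cs.length - 3) ≠ ['.', 'A', 'S'] := by
            intro h
            rw [pv_last_of_drop cs ['.', 'A', 'S'] (cs.length - 3) h (by decide)] at hlast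
            simp at hlast
          have hSW : cs.drop (cs.length - 3) ≠ ['.', 'S', 'W'] := by
            intro h
            rw [pv_last_of_drop cs ['.', 'S', 'W'] (cs.length - 3) h (by decide)] at hlast
            simp at hlast
          have hMI : cs.drop (cs.length - 3) ≠ ['.', 'M', 'I'] := by
            intro h
            rw [pv_last_of_drop cs ['.', 'M', 'I'] (cs.length - 3) h (by decide)] at hlast
            simp at hlast
          simp [pv_endswith_iff_drop, PySem.Dict.get?, hDE, Ne.symm hDE, hPA, Ne.symm hPA, hL,
                Ne.symm hAS, Ne.symm hSW, Ne.symm hMI]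
        · by_cases hAS : cs.drop (cs.length - 3) = ['.', 'A', 'S']
          · simp [pv_endswith_iff_drop, hL, hAS]
          · by_cases hSW : cs.drop (cs.length - 3) = ['.', 'S', 'W']
            · simp [pv_endswith_iff_drop, hL,
                    hSW]
            · by_cases hMI : cs.drop (cs.length - 3) = ['.', 'M', 'I']
              · simp [pv_endswith_iff_drop, hL,
                      hMI]
              · simp [pv_endswith_iff_drop, PySem.Dict.get?, hDE, Ne.symm hDE, hPA, Ne.symm hPA, hL,
                      hAS, Ne.symm hAS, hSW, Ne.symm hSW, hMI, Ne.symm hMI]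

-- ===== VERDICT (by name: the statement is the Claim_ definition above) =====
theorem format_t212_ticker_spec : Claim_equal_format_t212_ticker := by
  intro ticker _
  unfold Spec_format_t212_ticker
  have h := format_t212_ticker_main ticker.toList
  simpa using h
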